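-- pv_equiv track=rewrite | github.com/RabbiHasan7040/Encrypted_Message | encrypt_meessage.py | rkey
-- ===== SOURCE A (Python) =====
-- def rkey(key):
--     alphabets = "ABCDEFGHIJKLMNOPQRSTUVWXYZ"
--     r_key = []
--     for alph in alphabets:
--         n = 0
--         for x in key:
--             if alph == x and n==0:
--                 r_key.append(x)
--                 n+=1
--     return r_key
-- ===== SOURCE B (Python) =====
-- def rkey(key):
--     return sorted(set(key) & set("ABCDEFGHIJKLMNOPQRSTUVWXYZ"))
-- ===== Notes on version B (the rewrite author's own statement) =====
-- stated objective: faster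
-- what changed: Replaces the 26 flagged scans of key (one per alphabet letter) with a single-pass set intersection of key with the A-Z set followed by a sort of at most 26 elements.
import Mathlib
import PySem

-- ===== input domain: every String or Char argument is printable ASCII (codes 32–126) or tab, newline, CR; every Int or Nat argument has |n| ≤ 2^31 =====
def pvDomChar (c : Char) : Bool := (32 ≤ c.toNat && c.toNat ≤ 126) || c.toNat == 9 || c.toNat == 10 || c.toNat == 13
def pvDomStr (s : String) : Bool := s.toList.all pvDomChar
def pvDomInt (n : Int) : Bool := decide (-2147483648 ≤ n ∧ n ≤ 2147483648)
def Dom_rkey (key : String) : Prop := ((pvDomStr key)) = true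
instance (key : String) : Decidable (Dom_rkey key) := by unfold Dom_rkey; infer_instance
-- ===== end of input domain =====

-- B replaces A's 26 per-letter flagged scans of key by one set intersection plus a sort (simpler).

-- ===== PORT A =====
def rkey (key : String) : List String :=
  let alphabets := "ABCDEFGHIJKLMNOPQRSTUVWXYZ"
  alphabets.toList.foldl (fun r_key alph =>
    (key.toList.foldl (fun (st : List String × Nat) x =>
        if alph = x ∧ st.2 = 0 then (st.1 ++ [String.ofList [x]], st.2 + 1) else st)
      (r_key, 0)).1) []

-- ===== PORT B =====
-- set(key) & set("A..Z") = the distinct chars of key that lie in the A-Z set;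
-- sorted over 1-char strings = sort the chars, then view each as a string.
def rkey_alt (key : String) : List String :=
  let present := (PySem.Set.ofList key.toList).filter
    (fun c => c ∈ "ABCDEFGHIJKLMNOPQRSTUVWXYZ".toList)
  (PySem.List.sorted present (fun c => c) false).map (fun c => String.ofList [c])

-- ===== PRECONDITION & SPEC =====
def Spec_rkey (key : String) (out : List String) : Prop := out = rkey_alt key
instance (key : String) (out : List String) : Decidable (Spec_rkey key out) := by unfold Spec_rkey; infer_instance

-- ===== CLAIM (what is proved, stated in full; the proofs are below) =====
def Claim_equal_rkey : Prop := ∀ (key : String), Dom_rkey key → Spec_rkey key (rkey key)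

-- ===== LEMMAS AND PROOFS =====

-- A's inner loop: with the flag already set, nothing is appended.
theorem rkey_inner_flag (l : List Char) (alph : Char) (acc : List String) (n : Nat) (hn : n ≠ 0) :
    l.foldl (fun (st : List String × Nat) x =>
        if alph = x ∧ st.2 = 0 then (st.1 ++ [String.ofList [x]], st.2 + 1) else st) (acc, n)
      = (acc, n) := by
  induction l with
  | nil => rfl
  | cons x t ih => simp [List.foldl, hn]; exact ih

-- A's inner loop with flag 0 appends alph exactly once iff alph occurs in l.
theorem rkey_inner (l : List Char) (alph : Char) (acc : List String) :
    (l.foldl (fun (st : List String × Nat) x =>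
        if alph = x ∧ st.2 = 0 then (st.1 ++ [String.ofList [x]], st.2 + 1) else st) (acc, 0)).1
      = if alph ∈ l then acc ++ [String.ofList [alph]] else acc := by
  induction l generalizing acc with
  | nil => rfl
  | cons x t ih =>
    by_cases hx : alph = x
    · subst hx
      simp [List.foldl, rkey_inner_flag t alph (acc ++ [String.ofList [alph]]) 1 (by omega)]
    · simp [List.foldl, hx, ih, List.mem_cons]

-- A equals the alphabet filtered by membership in key, as strings.
theorem rkey_eq_filter (key : String) :
    rkey key = (("ABCDEFGHIJKLMNOPQRSTUVWXYZ".toList.filter (fun c => c ∈ key.toList)).map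
      (fun c => String.ofList [c])) := by
  unfold rkey
  have h : ∀ (al : List Char) (acc : List String),
      al.foldl (fun r_key alph =>
        (key.toList.foldl (fun (st : List String × Nat) x =>
            if alph = x ∧ st.2 = 0 then (st.1 ++ [String.ofList [x]], st.2 + 1) else st)
          (r_key, 0)).1) acc
        = acc ++ (al.filter (fun c => c ∈ key.toList)).map (fun c => String.ofList [c]) := by
    intro al
    induction al with
    | nil => simp
    | cons a t ih =>
      intro acc
      simp only [List.foldl, rkey_inner key.toList a acc]
      by_cases ha : a ∈ key.toList
      · simp [ha, ih]
      · simp [ha, ih]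
  simpa using h "ABCDEFGHIJKLMNOPQRSTUVWXYZ".toList []

-- B's sorted deduped intersection equals the same filtered alphabet (as chars).
theorem rkey_alt_sorted_eq (key : String) :
    PySem.List.sorted ((PySem.Set.ofList key.toList).filter
        (fun c => c ∈ "ABCDEFGHIJKLMNOPQRSTUVWXYZ".toList)) (fun c => c) false
      = "ABCDEFGHIJKLMNOPQRSTUVWXYZ".toList.filter (fun c => c ∈ key.toList) := by
  apply PySem.List.sorted_eq_of_perm_of_pairwise_lt
  · apply (List.perm_ext_iff_of_nodup ?_ ?_).2
    · intro c
      simp [List.mem_filter, PySem.Set.mem_ofList, and_comm]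
    · exact List.Nodup.filter _ (by decide)
    · exact List.Nodup.filter _ (PySem.Set.nodup_ofList _)
  · exact List.Pairwise.filter _ (by decide)

-- ===== VERDICT (by name: the statement is the Claim_ definition above) =====
theorem rkey_spec : Claim_equal_rkey := by
  intro key _
  unfold Spec_rkey
  simp only [rkey_alt, rkey_eq_filter, rkey_alt_sorted_eq]
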